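-- pv_equiv track=rewrite | github.com/Din974/My_projects | autoCompletion/main.py | sort_descending_order
-- ===== SOURCE A (Python) =====
-- def clean_occurences(res):
--     new = []
--     for x in range(len(res)):
--         if new.count(res[x]) == 0:
--             new.append(res[x])
--     return new
--
-- def sort_descending_order(res):
--     sort = sorted(res, key = res.count, reverse = True)
--     letter_list = []
--     res = []
--     for x in range(len(sort)):
--         letter_list.append(sort[x][0])
--     max_occurence = letter_list.count(max(letter_list, key=letter_list.count))
--     while max_occurence != 0:
--         for x in range(len(sort)):
--             if letter_list.count(sort[x][0]) == max_occurence: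
--                 res.append(sort[x])
--         max_occurence -= 1
--     return clean_occurences(res)
-- ===== SOURCE B (Python) =====
-- def sort_descending_order(res):
--     cnt = {}
--     for s in res:
--         cnt[s] = cnt.get(s, 0) + 1
--     lf = {}
--     for s in res:
--         c = s[0]
--         lf[c] = lf.get(c, 0) + 1
--     order = sorted(res, key=lambda s: -cnt[s])
--     order.sort(key=lambda s: -lf[s[0]])
--     seen = set()
--     out = []
--     for s in order:
--         if s not in seen:
--             seen.add(s)
--             out.append(s)
--     return out
-- ===== Notes on version B (the rewrite author's own statement) =====
-- stated objective: faster
-- what changed: B precomputes element and first-letter frequencies in dicts once, replaces A's O(n^2)-key sort plus the while-loop frequency bucketing by two stable O(n log n) sorts with dict-lookup keys, and dedups with a seen-set instead of clean_occurences' quadratic count scan.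
import Mathlib
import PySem

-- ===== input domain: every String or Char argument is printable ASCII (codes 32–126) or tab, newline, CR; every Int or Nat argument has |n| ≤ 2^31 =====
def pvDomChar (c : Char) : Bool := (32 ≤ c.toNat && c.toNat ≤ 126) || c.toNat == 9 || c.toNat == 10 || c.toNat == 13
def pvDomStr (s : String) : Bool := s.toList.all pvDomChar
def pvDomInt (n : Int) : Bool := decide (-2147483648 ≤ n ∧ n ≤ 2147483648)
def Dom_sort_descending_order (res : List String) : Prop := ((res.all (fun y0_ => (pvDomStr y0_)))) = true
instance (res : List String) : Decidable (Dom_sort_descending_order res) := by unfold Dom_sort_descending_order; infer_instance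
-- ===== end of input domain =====

-- B replaces A's O(n^2)-key sort, while-loop frequency bucketing and quadratic dedup by
-- dict counters, two stable sorts and a seen-set dedup (measured asymptotically faster).

-- ===== PORT A =====
-- Python s[0]; Pre_ admits only nonempty strings, where this is exact (Python raises IndexError on "").
def pvHead (s : String) : Char := s.toList.headD ' '

def clean_occurences (res : List String) : List String :=
  res.foldl (fun new s => if new.count s == 0 then new ++ [s] else new) []

-- the 'while max_occurence != 0' loop, counting down; acc is the accumulated 'res' list
def pvAWhile (sort : List String) (letters : List Char) : Nat → List String → List String
  | 0, acc => acc
  | Nat.succ k, acc =>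
      pvAWhile sort letters k
        (sort.foldl (fun acc2 s => if letters.count (pvHead s) == Nat.succ k then acc2 ++ [s] else acc2) acc)

def sort_descending_order (res : List String) : List String :=
  let sort := PySem.List.sorted res (fun s => (res.count s : Int)) true
  let letter_list := sort.foldl (fun acc s => acc ++ [pvHead s]) []
  -- max(letter_list, key=letter_list.count); .getD ' ' only on the empty list, which Pre_ excludes
  let maxc := (PySem.List.max? letter_list (fun c => letter_list.count c)).getD ' '
  let max_occurence := letter_list.count maxc
  clean_occurences (pvAWhile sort letter_list max_occurence [])

-- ===== PORT B =====
def sort_descending_order_alt (res : List String) : List String :=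
  let cnt := res.foldl (fun d s => d.insert s (d.getD s 0 + 1)) (PySem.Dict.empty : PySem.Dict String Int)
  let lf := res.foldl (fun d s => d.insert (pvHead s) (d.getD (pvHead s) 0 + 1)) (PySem.Dict.empty : PySem.Dict Char Int)
  let order := PySem.List.sorted res (fun s => -(cnt.getD s 0))
  let order2 := PySem.List.sorted order (fun s => -(lf.getD (pvHead s) 0))
  (order2.foldl
    (fun (p : PySem.Set String × List String) s =>
      if PySem.Set.contains p.1 s then p else (PySem.Set.add p.1 s, p.2 ++ [s]))
    ((PySem.Set.empty : PySem.Set String), ([] : List String))).2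

-- ===== PRECONDITION & SPEC =====
-- Pre_ excludes exactly where Python A raises: the empty list (max() of an empty sequence is a
-- ValueError) and lists containing an empty string (s[0] is an IndexError).
def Pre_sort_descending_order (res : List String) : Prop :=
  res ≠ [] ∧ ∀ s ∈ res, s ≠ ""
instance (res : List String) : Decidable (Pre_sort_descending_order res) := by
  unfold Pre_sort_descending_order; infer_instance

def pvWitness_sort_descending_order : List String := ["ab", "c", "ab"]

def Spec_sort_descending_order (res : List String) (out : List String) : Prop := out = sort_descending_order_alt res
instance (res : List String) (out : List String) : Decidable (Spec_sort_descending_order res out) := by unfold Spec_sort_descending_order; infer_instance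

-- ===== CLAIM (what is proved, stated in full; the proofs are below) =====
def Claim_equal_sort_descending_order : Prop := ∀ (res : List String), Dom_sort_descending_order res → Pre_sort_descending_order res → Spec_sort_descending_order res (sort_descending_order res)

-- ===== LEMMAS AND PROOFS =====

-- x goes before the whole list
theorem pv_insertBy_all_before {α : Type} (before : α → α → Bool) (x : α) (l : List α)
    (h : ∀ y ∈ l, before x y = true) :
    PySem.List.insertBy before x l = x :: l := by
  cases l with
  | nil => rfl
  | cons y ys => simp [PySem.List.insertBy, h y (by simp)]

-- x skips over a prefix none of whose elements it goes before
theorem pv_insertBy_skip {α : Type} (before : α → α → Bool) (x : α) (l t : List α)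
    (h : ∀ y ∈ l, before x y = false) :
    PySem.List.insertBy before x (l ++ t) = l ++ PySem.List.insertBy before x t := by
  induction l with
  | nil => rfl
  | cons y ys ih =>
      simp only [List.cons_append, PySem.List.insertBy, h y (by simp)]
      simp only [Bool.false_eq_true, if_false]
      rw [ih (fun y hy => h y (by simp [hy]))]

-- concatenation of the value-buckets of xs, bucket values listed in vs order
def pvBucket {α : Type} (f : α → Nat) (vs : List Nat) (xs : List α) : List α :=
  vs.flatMap (fun v => xs.filter (fun x => f x == v))

theorem pv_insertBy_bucket {α : Type} (f : α → Nat) (x : α) (vs : List Nat) (xs : List α)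
    (hvs : vs.Pairwise (· > ·)) (hx : f x ∈ vs) :
    PySem.List.insertBy (fun a b => decide (f b < f a)) x (pvBucket f vs xs)
      = pvBucket f vs (xs ++ [x]) := by
  induction vs with
  | nil => simp at hx
  | cons v vt ih =>
      have hvt : ∀ w ∈ vt, w < v := by
        intro w hw; exact (List.pairwise_cons.1 hvs).1 w hw
      by_cases hfx : f x = v
      · -- x lands at the end of the v-bucket, before everything in the later buckets
        have hmem : ∀ y ∈ pvBucket f vt xs, decide (f y < f x) = true := by
          intro y hy
          simp only [pvBucket, List.mem_flatMap, List.mem_filter] at hy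
          obtain ⟨w, hw, _, hfy⟩ := hy
          simp only [beq_iff_eq] at hfy
          simp [hfy, hfx, hvt w hw]
        have hskip : ∀ y ∈ xs.filter (fun z => f z == v), (fun a b => decide (f b < f a)) x y = false := by
          intro y hy
          simp only [List.mem_filter, beq_iff_eq] at hy
          simp [hy.2, hfx]
        simp only [pvBucket, List.flatMap_cons] at *
        rw [pv_insertBy_skip _ _ _ _ hskip,
            pv_insertBy_all_before _ _ _ hmem]
        have hnot : ∀ w ∈ vt, ¬ (f x = w) := by
          intro w hw hc; have := hvt w hw; omega
        have h2 : pvBucket f vt (xs ++ [x]) = pvBucket f vt xs := by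
          simp only [pvBucket]
          refine List.flatMap_congr (fun w hw => ?_)
          simp [List.filter_append, hnot w hw]
        simp only [pvBucket] at h2
        rw [h2]
        simp [List.filter_append, hfx]
      · -- x belongs to a later bucket
        have hx' : f x ∈ vt := by
          rcases List.mem_cons.1 hx with hh | hh
          · exact absurd hh hfx
          · exact hh
        have hskip : ∀ y ∈ xs.filter (fun z => f z == v), (fun a b => decide (f b < f a)) x y = false := by
          intro y hy
          simp only [List.mem_filter, beq_iff_eq] at hy
          have := hvt _ hx'
          simp [hy.2]; omega
        simp only [pvBucket, List.flatMap_cons] at *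
        rw [pv_insertBy_skip _ _ _ _ hskip, ih (List.pairwise_cons.1 hvs).2 hx']
        have : (xs ++ [x]).filter (fun z => f z == v) = xs.filter (fun z => f z == v) := by
          simp [List.filter_append, hfx]
        rw [this]

-- a reverse=True sort whose key values all lie in a strictly decreasing list vs IS the bucket concatenation
theorem pv_sorted_rev_eq_bucket {α : Type} (f : α → Nat) (vs : List Nat) (xs : List α)
    (hvs : vs.Pairwise (· > ·)) (hall : ∀ x ∈ xs, f x ∈ vs) :
    PySem.List.sorted xs f true = pvBucket f vs xs := by
  induction xs using List.reverseRecOn with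
  | nil => simp [PySem.List.sorted, pvBucket]
  | append_singleton ys y ih =>
      rw [PySem.List.sorted_rev_eq_foldl_insertBy] at *
      rw [List.foldl_append]
      simp only [List.foldl_cons, List.foldl_nil]
      rw [ih (fun x hx => hall x (by simp [hx]))]
      exact pv_insertBy_bucket f y vs ys hvs (hall y (by simp))

-- the descending value list M, M-1, …, 1
def pvDesc : Nat → List Nat
  | 0 => []
  | Nat.succ k => Nat.succ k :: pvDesc k

theorem pv_mem_pvDesc (v k : Nat) : v ∈ pvDesc k ↔ 1 ≤ v ∧ v ≤ k := by
  induction k with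
  | zero => simp [pvDesc]; omega
  | succ k ih => simp [pvDesc, ih]; omega

theorem pv_pvDesc_pairwise (k : Nat) : (pvDesc k).Pairwise (· > ·) := by
  induction k with
  | zero => exact List.Pairwise.nil
  | succ k ih =>
      refine List.pairwise_cons.2 ⟨?_, ih⟩
      intro v hv; exact Nat.lt_succ_of_le ((pv_mem_pvDesc v k).1 hv).2

-- A's while loop builds the bucket concatenation
theorem pv_aWhile_eq_bucket (sort : List String) (letters : List Char) (k : Nat) (acc : List String) :
    pvAWhile sort letters k acc
      = acc ++ pvBucket (fun s => letters.count (pvHead s)) (pvDesc k) sort := by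
  induction k generalizing acc with
  | zero => simp [pvAWhile, pvBucket, pvDesc]
  | succ k ih =>
      rw [pvAWhile, ih]
      rw [PySem.List.foldl_append_if_eq_filter]
      simp [pvBucket, pvDesc, List.flatMap_cons]

-- sorting with reverse=True equals sorting by the negated Int key (stable, same comparisons)
theorem pv_sorted_rev_eq_sorted_neg {α κ : Type} [LinearOrder κ] (xs : List α)
    (f : α → κ) (g : α → Int) (h : ∀ a b, f a < f b ↔ g a < g b) :
    PySem.List.sorted xs f true = PySem.List.sorted xs (fun x => -(g x)) false := by
  rw [PySem.List.sorted_rev_eq_foldl_insertBy, PySem.List.sorted_eq_foldl_insertBy]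
  congr 1
  funext acc x
  congr 1
  funext a b
  rw [decide_eq_decide, neg_lt_neg_iff]
  exact h b a

-- A's dedup is set(…) in first-insertion order
theorem pv_clean_eq_ofList (xs : List String) :
    clean_occurences xs = PySem.Set.ofList xs := by
  rw [PySem.Set.ofList_eq_foldl]
  unfold clean_occurences
  apply PySem.List.foldl_congr_mem
  intro acc x _
  by_cases hx : x ∈ acc
  · simp [PySem.Set.add, PySem.Set.contains, hx, List.count_eq_zero]
  · simp [PySem.Set.add, PySem.Set.contains, hx, List.count_eq_zero]

-- B's seen/out pair stays equal componentwise
theorem pv_seen_loop (l : List String) (s : List String) :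
    l.foldl
      (fun (p : PySem.Set String × List String) x =>
        if PySem.Set.contains p.1 x then p else (PySem.Set.add p.1 x, p.2 ++ [x]))
      (s, s)
    = (l.foldl PySem.Set.add s, l.foldl PySem.Set.add s) := by
  induction l generalizing s with
  | nil => rfl
  | cons x xs ih =>
      simp only [List.foldl_cons]
      by_cases hx : x ∈ s
      · have hc : PySem.Set.contains s x = true := by simp [PySem.Set.contains, hx]
        simp only [hc, if_true]
        rw [show PySem.Set.add s x = s by simp [PySem.Set.add, PySem.Set.contains, hx]]
        exact ih s
      · have hc : PySem.Set.contains s x = false := by simp [PySem.Set.contains, hx]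
        simp only [hc, Bool.false_eq_true, if_false]
        rw [show PySem.Set.add s x = s ++ [x] by simp [PySem.Set.add, PySem.Set.contains, hx]]
        exact ih (s ++ [x])

-- ===== VERDICT (by name: the statement is the Claim_ definition above) =====
theorem sort_descending_order_spec : Claim_equal_sort_descending_order := by
  intro res _ hpre
  obtain ⟨hne, -⟩ := hpre
  unfold Spec_sort_descending_order sort_descending_order sort_descending_order_alt
  dsimp only
  rw [PySem.List.foldl_append_singleton_eq_map, List.nil_append]
  set Sa := PySem.List.sorted res (fun s => (res.count s : Int)) true with hSa
  set L : List Char := Sa.map pvHead with hL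
  -- the letter counts of L agree with those of res.map pvHead (Sa is a permutation of res)
  have hcnt : ∀ c : Char, L.count c = (res.map pvHead).count c := by
    intro c
    exact ((PySem.List.sorted_perm res (fun s => (res.count s : Int)) true).map pvHead).count_eq c
  -- max(letter_list, key=letter_list.count) exists
  have hSane : Sa ≠ [] := by
    rw [hSa, Ne, PySem.List.sorted_eq_nil_iff]; exact hne
  have hLne : L ≠ [] := by
    rw [hL]; simpa using hSane
  obtain ⟨m, hm⟩ : ∃ m, PySem.List.max? L (fun c => L.count c) = some m := by
    cases hmx : PySem.List.max? L (fun c => L.count c) with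
    | none => exact absurd ((PySem.List.max?_eq_none_iff L _).1 hmx) hLne
    | some m => exact ⟨m, rfl⟩
  rw [hm]
  simp only [Option.getD_some]
  -- A's while loop is the bucket concatenation, which is the reverse=True sort by letter count
  rw [pv_aWhile_eq_bucket, List.nil_append, pv_clean_eq_ofList]
  have hall : ∀ s ∈ Sa, (fun s => L.count (pvHead s)) s ∈ pvDesc (L.count m) := by
    intro s hs
    have hmem : pvHead s ∈ L := List.mem_map_of_mem hs
    refine (pv_mem_pvDesc _ _).2 ⟨List.count_pos_iff.2 hmem, ?_⟩
    exact PySem.List.max?_isMax hm (pvHead s) hmem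
  rw [← pv_sorted_rev_eq_bucket (fun s => L.count (pvHead s)) (pvDesc (L.count m)) Sa
        (pv_pvDesc_pairwise _) hall]
  rw [pv_sorted_rev_eq_sorted_neg Sa (fun s => L.count (pvHead s))
        (fun s => (((res.map pvHead).count (pvHead s) : Nat) : Int))
        (by intro a b; simp [hcnt, Nat.cast_lt])]
  -- B's counter dicts look up the corresponding counts
  have hcntd : (fun s => -((res.foldl (fun d s => d.insert s (d.getD s 0 + 1))
      (PySem.Dict.empty : PySem.Dict String Int)).getD s 0))
      = fun s => -((res.count s : Int)) := by
    funext s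
    rw [PySem.Dict.getD_foldl_insert_add_one]
    simp [PySem.Dict.empty, PySem.Dict.getD, PySem.Dict.get?]
  have hlfd : (fun s => -((res.foldl (fun d s => d.insert (pvHead s) (d.getD (pvHead s) 0 + 1))
      (PySem.Dict.empty : PySem.Dict Char Int)).getD (pvHead s) 0))
      = fun s => -((((res.map pvHead).count (pvHead s) : Nat) : Int)) := by
    funext s
    have hfold : res.foldl (fun d s => d.insert (pvHead s) (d.getD (pvHead s) 0 + 1))
          (PySem.Dict.empty : PySem.Dict Char Int)
        = (res.map pvHead).foldl (fun (d : PySem.Dict Char Int) c => d.insert c (d.getD c 0 + 1))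
          PySem.Dict.empty :=
      (List.foldl_map (f := pvHead)
        (g := fun (d : PySem.Dict Char Int) c => d.insert c (d.getD c 0 + 1))
        (l := res) (init := PySem.Dict.empty)).symm
    rw [hfold, PySem.Dict.getD_foldl_insert_add_one]
    simp [PySem.Dict.empty, PySem.Dict.getD, PySem.Dict.get?]
  rw [hcntd, hlfd]
  -- A's reverse=True count sort is B's stable sort by the negated count
  rw [← pv_sorted_rev_eq_sorted_neg res (fun s => (res.count s : Int))
        (fun s => (res.count s : Int)) (fun a b => Iff.rfl), ← hSa]
  -- B's seen-set loop is set(…) in first-insertion order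
  rw [show (PySem.Set.empty : PySem.Set String) = ([] : List String) from rfl]
  rw [pv_seen_loop _ ([] : List String), ← PySem.Set.ofList_eq_foldl]
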